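-- pv_equiv track=rewrite | github.com/simonjheiler/function_approximation | files/interpolate.py | state_to_id
-- ===== SOURCE A (Python) =====
-- def state_to_id(state, dims_state_grid):
--     id = 0
--     for i in range(len(dims_state_grid) - 1):
--         step_size = 1
--         for d in dims_state_grid[i + 1 :]:
--             step_size *= d
--         id += state[i] * step_size
--     id += state[-1]
--     return id
-- ===== SOURCE B (Python) =====
-- def state_to_id(state, dims_state_grid):
--     id = 0
--     for x, d in zip(state, dims_state_grid[1:]):
--         id = (id + x) * d
--     return id + state[-1]
-- ===== Notes on version B (the rewrite author's own statement) =====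
-- stated objective: faster
-- what changed: Replaced the nested loop that recomputes the suffix product of dims for every index with a single forward Horner pass over zip(state, dims[1:]).
import Mathlib
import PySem

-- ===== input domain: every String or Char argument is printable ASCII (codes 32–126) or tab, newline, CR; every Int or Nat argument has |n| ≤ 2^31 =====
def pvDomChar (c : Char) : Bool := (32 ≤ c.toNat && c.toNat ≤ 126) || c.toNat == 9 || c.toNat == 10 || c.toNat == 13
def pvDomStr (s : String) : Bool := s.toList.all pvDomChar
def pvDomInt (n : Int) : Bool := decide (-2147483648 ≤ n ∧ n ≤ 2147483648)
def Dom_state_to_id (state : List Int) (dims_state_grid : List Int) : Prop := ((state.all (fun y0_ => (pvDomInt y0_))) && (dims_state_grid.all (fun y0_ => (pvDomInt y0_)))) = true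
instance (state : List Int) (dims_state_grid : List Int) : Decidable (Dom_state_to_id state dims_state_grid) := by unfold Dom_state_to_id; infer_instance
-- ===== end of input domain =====

-- B replaces A's nested loop (which recomputes the suffix product of dims for each index)
-- with one forward Horner pass over zip(state, dims[1:]); measurably faster (O(n) vs O(n^2)).

-- ===== PORT A =====
def state_to_id (state : List Int) (dims_state_grid : List Int) : Int :=
  let id : Int :=
    (PySem.List.pyRange 0 ((dims_state_grid.length : Int) - 1) 1).foldl
      (fun id i =>
        let step_size : Int :=
          (PySem.List.slice dims_state_grid (some (i + 1)) none).foldl (fun s d => s * d) 1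
        id + PySem.List.pyGetD state i 0 * step_size) 0
  id + PySem.List.pyGetD state (-1) 0

-- ===== PORT B =====
def state_to_id_alt (state : List Int) (dims_state_grid : List Int) : Int :=
  let id : Int :=
    (state.zip (PySem.List.slice dims_state_grid (some 1) none)).foldl
      (fun id p => (id + p.1) * p.2) 0
  id + PySem.List.pyGetD state (-1) 0

-- ===== PRECONDITION & SPEC =====
-- Pre_ admits exactly the inputs on which the Python A returns: state nonempty (state[-1])
-- and long enough that state[i] is in range for every loop index i < len(dims)-1.
def Pre_state_to_id (state : List Int) (dims_state_grid : List Int) : Prop :=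
  state ≠ [] ∧ dims_state_grid.length ≤ state.length + 1
instance (state : List Int) (dims_state_grid : List Int) : Decidable (Pre_state_to_id state dims_state_grid) := by unfold Pre_state_to_id; infer_instance

def pvWitness_state_to_id : List Int × List Int := ([1, 2], [3, 4])

def Spec_state_to_id (state : List Int) (dims_state_grid : List Int) (out : Int) : Prop := out = state_to_id_alt state dims_state_grid
instance (state : List Int) (dims_state_grid : List Int) (out : Int) : Decidable (Spec_state_to_id state dims_state_grid out) := by unfold Spec_state_to_id; infer_instance

-- ===== CLAIM (what is proved, stated in full; the proofs are below) =====
def Claim_equal_state_to_id : Prop := ∀ (state : List Int) (dims_state_grid : List Int), Dom_state_to_id state dims_state_grid → Pre_state_to_id state dims_state_grid → Spec_state_to_id state dims_state_grid (state_to_id state dims_state_grid)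

-- ===== LEMMAS AND PROOFS =====

-- A's value in terms of the tail t of dims, as structural recursion: Σ st[k] * prod (t.drop k).
def asum : List Int → List Int → Int
  | d :: t, s :: st => s * ((d :: t).foldl (· * ·) 1) + asum t st
  | _, _ => 0

theorem foldl_mul_one (l : List Int) (a : Int) :
    l.foldl (· * ·) a = a * l.foldl (· * ·) 1 := by
  induction l generalizing a with
  | nil => simp
  | cons d t ih =>
    simp only [List.foldl_cons]
    rw [ih (a * d), ih (1 * d)]
    ring

theorem horner_eq_asum (t : List Int) (st : List Int) (a : Int)
    (h : t.length ≤ st.length) :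
    (st.zip t).foldl (fun id p => (id + p.1) * p.2) a
      = a * t.foldl (· * ·) 1 + asum t st := by
  induction t generalizing st a with
  | nil => simp [asum]
  | cons d t' ih =>
    cases st with
    | nil => simp at h
    | cons s st' =>
      simp only [List.zip_cons_cons, List.foldl_cons]
      rw [ih st' ((a + s) * d) (by simpa using h)]
      simp only [asum, List.foldl_cons]
      rw [foldl_mul_one t' (1 * d)]
      ring

theorem zero_terms_fold (l : List Nat) (a : Int) (f : Nat → Int)
    (hf : ∀ k, f k = 0) :
    l.foldl (fun id k => id + f k) a = a := by
  induction l generalizing a with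
  | nil => rfl
  | cons x l ih => rw [List.foldl_cons, hf, add_zero]; exact ih a

theorem rangefold_eq_asum (t : List Int) (st : List Int) (a : Int) :
    (List.range t.length).foldl
      (fun id k => id + st.getD k 0 * ((t.drop k).foldl (· * ·) 1)) a
      = a + asum t st := by
  induction t generalizing st a with
  | nil => simp [asum]
  | cons d t' ih =>
    cases st with
    | nil =>
      rw [zero_terms_fold _ _ _ (fun k => by simp)]
      cases t' <;> simp [asum]
    | cons s st' =>
      simp only [List.length_cons, List.range_succ_eq_map, List.foldl_cons, List.foldl_map]
      simp only [List.getD_cons_succ, List.getD_cons_zero, List.drop_zero, List.drop_succ_cons]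
      rw [ih st' (a + s * ((d :: t').foldl (· * ·) 1))]
      simp only [asum]
      ring

theorem state_to_id_spec : Claim_equal_state_to_id := by
  intro state dims _ hpre
  obtain ⟨hne, hlen⟩ := hpre
  unfold Spec_state_to_id state_to_id state_to_id_alt
  cases dims with
  | nil =>
    simp [PySem.List.slice_from_one]
  | cons d t =>
    have hlt : ((d :: t).length : Int) - 1 = (t.length : Int) := by
      push_cast [List.length_cons]; ring
    rw [hlt, PySem.List.pyRange_one]
    simp only [sub_zero, Int.toNat_natCast, List.foldl_map, zero_add,
      PySem.List.pyGetD_natCast, PySem.List.slice_from_one, List.tail_cons]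
    have hbody : (fun (x : Int) (y : Nat) => x +
          state.getD y 0 *
            (PySem.List.slice (d :: t) (some ((y : Int) + 1)) none).foldl (fun s d => s * d) 1)
        = fun (id : Int) (k : Nat) => id + state.getD k 0 * ((t.drop k).foldl (· * ·) 1) := by
      funext x y
      have hk : ((y : Int) + 1) = ((y + 1 : Nat) : Int) := by push_cast; ring
      rw [hk, PySem.List.slice_from_natCast]
      simp
    rw [hbody]
    rw [rangefold_eq_asum t state 0,
        horner_eq_asum t state 0 (by simp only [List.length_cons] at hlen; omega)]
    ring
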